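-- pv_equiv track=rewrite | github.com/hardass/ML_ReviewsClassifier | test.py | Class5to2
-- ===== SOURCE A (Python) =====
-- def Class5to2 (x, y):
-- 	x2 = []
-- 	y2 = []
-- 	for i in range(len(x)):
-- 		if y[i] == 2:
-- 			continue
-- 		if y[i] > 2:
-- 			y2.append(1)
-- 		else:
-- 			y2.append(0)
-- 		x2.append(x[i])
-- 	return x2, y2
-- ===== SOURCE B (Python) =====
-- def Class5to2(x, y):
--     def go(lo, hi):
--         if hi - lo == 0:
--             return [], []
--         if hi - lo == 1:
--             v = y[lo]
--             if v == 2: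
--                 return [], []
--             return [x[lo]], [1 if v > 2 else 0]
--         mid = (lo + hi) // 2
--         xl, yl = go(lo, mid)
--         xr, yr = go(mid, hi)
--         return xl + xr, yl + yr
--     return go(0, len(x))
-- ===== Notes on version B (the rewrite author's own statement) =====
-- stated objective: alternative
-- what changed: Replaces A's single left-to-right loop growing x2 and y2 in lockstep with a divide-and-conquer recursion that splits the index interval in half, handles singletons at the leaves, and concatenates the two halves' results; correct because filtering/relabeling is position-wise and list concatenation reassembles the segments in order.
import Mathlib
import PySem

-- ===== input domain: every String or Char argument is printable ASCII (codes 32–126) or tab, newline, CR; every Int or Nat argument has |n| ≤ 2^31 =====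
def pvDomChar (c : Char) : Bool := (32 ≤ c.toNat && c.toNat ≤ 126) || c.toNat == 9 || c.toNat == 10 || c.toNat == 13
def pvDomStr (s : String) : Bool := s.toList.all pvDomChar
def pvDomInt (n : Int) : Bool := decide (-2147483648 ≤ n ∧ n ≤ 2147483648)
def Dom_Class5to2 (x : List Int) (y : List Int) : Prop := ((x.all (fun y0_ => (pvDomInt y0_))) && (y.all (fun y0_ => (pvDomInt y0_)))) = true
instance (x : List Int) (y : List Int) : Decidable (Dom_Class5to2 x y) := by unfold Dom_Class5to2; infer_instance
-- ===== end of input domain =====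

-- B replaces A's single left-to-right lockstep loop with a divide-and-conquer recursion
-- over index intervals (split in half, concatenate the halves' results). Alternative decomposition.

-- ===== PORT A =====
-- one loop over range(len(x)), growing (x2, y2) in lockstep
def Class5to2 (x : List Int) (y : List Int) : List Int × List Int :=
  (PySem.List.pyRange 0 x.length 1).foldl
    (fun (s : List Int × List Int) i =>
      let yi := PySem.List.pyGetD y i 0     -- y[i]; exact under Pre_ (index in range)
      if yi = 2 then s
      else (s.1 ++ [PySem.List.pyGetD x i 0], s.2 ++ [if yi > 2 then (1 : Int) else 0]))
    ([], [])

-- ===== PORT B =====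
-- go(lo, hi): divide-and-conquer on the index interval [lo, hi)
def Class5to2_altGo (x : List Int) (y : List Int) (lo hi : Nat) : List Int × List Int :=
  if hi - lo = 0 then ([], [])
  else if hi - lo = 1 then
    let v := PySem.List.pyGetD y (lo : Int) 0    -- y[lo]; exact under Pre_
    if v = 2 then ([], [])
    else ([PySem.List.pyGetD x (lo : Int) 0], [if v > 2 then (1 : Int) else 0])
  else
    let mid := (lo + hi) / 2
    let l := Class5to2_altGo x y lo mid
    let r := Class5to2_altGo x y mid hi
    (l.1 ++ r.1, l.2 ++ r.2)
termination_by hi - lo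
decreasing_by all_goals omega

def Class5to2_alt (x : List Int) (y : List Int) : List Int × List Int :=
  Class5to2_altGo x y 0 x.length

-- ===== PRECONDITION & SPEC =====
-- A raises IndexError when len(x) > len(y) (it indexes y by range(len(x))); those inputs are excluded.
def Pre_Class5to2 (x : List Int) (y : List Int) : Prop := x.length ≤ y.length
instance (x : List Int) (y : List Int) : Decidable (Pre_Class5to2 x y) := by unfold Pre_Class5to2; infer_instance
def pvWitness_Class5to2 : List Int × List Int := ([10, 20, 30, 40], [2, 5, 1, 3])
def Spec_Class5to2 (x : List Int) (y : List Int) (out : List Int × List Int) : Prop := out = Class5to2_alt x y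
instance (x : List Int) (y : List Int) (out : List Int × List Int) : Decidable (Spec_Class5to2 x y out) := by unfold Spec_Class5to2; infer_instance

-- ===== CLAIM (what is proved, stated in full; the proofs are below) =====
def Claim_equal_Class5to2 : Prop := ∀ (x : List Int) (y : List Int), Dom_Class5to2 x y → Pre_Class5to2 x y → Spec_Class5to2 x y (Class5to2 x y)

-- ===== LEMMAS AND PROOFS =====

-- common characterisation: the kept samples and kept binarized labels over a Nat index list
def pvKeep (x y : List Int) (l : List Nat) : List Int × List Int :=
  (l.filterMap (fun i => if y[i]?.getD 0 = 2 then none else some (x[i]?.getD 0)),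
   l.filterMap (fun i => if y[i]?.getD 0 = 2 then none else some (if 2 < y[i]?.getD 0 then (1 : Int) else 0)))

-- B's divide-and-conquer over [lo, hi) computes pvKeep of range' lo (hi - lo)
theorem altGo_eq_keep (x y : List Int) : ∀ lo hi : Nat,
    Class5to2_altGo x y lo hi = pvKeep x y (List.range' lo (hi - lo)) := by
  intro lo hi
  induction lo, hi using Class5to2_altGo.induct x y with
  | case1 lo hi h0 =>
    simp [Class5to2_altGo, h0, pvKeep]
  | case2 lo hi h0 h1 v hv =>
    rw [Class5to2_altGo, if_neg h0, if_pos h1]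
    simp only [h1, List.range'_one]
    by_cases h : y[lo]?.getD 0 = 2
    · simp [pvKeep, h, List.getD_eq_getElem?_getD]
    · simp [pvKeep, h, List.getD_eq_getElem?_getD]
  | case3 lo hi h0 h1 v hv =>
    rw [Class5to2_altGo, if_neg h0, if_pos h1]
    simp only [h1, List.range'_one]
    by_cases h : y[lo]?.getD 0 = 2
    · simp [pvKeep, h, List.getD_eq_getElem?_getD]
    · simp [pvKeep, h, List.getD_eq_getElem?_getD]
  | case4 lo hi h0 h1 mid ihl ihr =>
    rw [Class5to2_altGo, if_neg h0, if_neg h1]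
    have hsplit : List.range' lo ((lo + hi) / 2 - lo) ++ List.range' ((lo + hi) / 2) (hi - (lo + hi) / 2)
        = List.range' lo (hi - lo) := by
      have := List.range'_append (s := lo) (m := (lo + hi) / 2 - lo) (n := hi - (lo + hi) / 2) (step := 1)
      simp only [one_mul] at this
      rw [show lo + ((lo + hi) / 2 - lo) = (lo + hi) / 2 by omega] at this
      rw [this]
      congr 1
      omega
    have ihl' : Class5to2_altGo x y lo ((lo + hi) / 2) = pvKeep x y (List.range' lo ((lo + hi) / 2 - lo)) := ihl
    have ihr' : Class5to2_altGo x y ((lo + hi) / 2) hi = pvKeep x y (List.range' ((lo + hi) / 2) (hi - (lo + hi) / 2)) := ihr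
    show ((Class5to2_altGo x y lo ((lo + hi) / 2)).1 ++ (Class5to2_altGo x y ((lo + hi) / 2) hi).1,
          (Class5to2_altGo x y lo ((lo + hi) / 2)).2 ++ (Class5to2_altGo x y ((lo + hi) / 2) hi).2)
        = pvKeep x y (List.range' lo (hi - lo))
    rw [ihl', ihr', ← hsplit]
    simp [pvKeep]

-- A's lockstep fold over any Nat index list (cast to Int), with any accumulator
theorem fold_eq_keep (y x : List Int) (l : List Nat) (acc : List Int × List Int) :
    ((l.map (fun k : Nat => (k : Int))).foldl
      (fun (s : List Int × List Int) i =>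
        let yi := PySem.List.pyGetD y i 0
        if yi = 2 then s
        else (s.1 ++ [PySem.List.pyGetD x i 0], s.2 ++ [if yi > 2 then (1 : Int) else 0]))
      acc)
    = (acc.1 ++ (pvKeep x y l).1, acc.2 ++ (pvKeep x y l).2) := by
  induction l generalizing acc with
  | nil => simp [pvKeep]
  | cons i t ih =>
    by_cases h : y[i]?.getD 0 = 2
    · simp [pvKeep, h, ih, List.getD]
    · simp [pvKeep, h, ih, List.getD]

-- ===== VERDICT (by name: the statement is the Claim_ definition above) =====
theorem Class5to2_spec : Claim_equal_Class5to2 := by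
  intro x y _ _
  unfold Spec_Class5to2 Class5to2 Class5to2_alt
  rw [altGo_eq_keep]
  have hr : PySem.List.pyRange 0 x.length 1 = (List.range x.length).map (fun k : Nat => (k : Int)) := by
    rw [PySem.List.pyRange_one]
    simp
  rw [hr, List.range_eq_range', fold_eq_keep]
  simp
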